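-- pv_equiv track=rewrite | github.com/Nishith-2711/Football-Analysis | src/utils/video_functions.py | adjust_positions_for_camera_movement
-- ===== SOURCE A (Python) =====
-- def adjust_positions_for_camera_movement(positions, camera_movements):
--     """
--     Adjust object positions to account for camera movement
--
--     Args:
--         positions: List of (x, y) positions
--         camera_movements: Camera movement for each frame
--
--     Returns:
--         Adjusted positions
--     """
--     adjusted_positions = []
--     cumulative_movement = [0, 0]
--
--     for i, pos in enumerate(positions):
--         if i < len(camera_movements):
--             cumulative_movement[0] -= camera_movements[i][0]
--             cumulative_movement[1] -= camera_movements[i][1]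
--
--         adjusted_pos = [
--             pos[0] + cumulative_movement[0],
--             pos[1] + cumulative_movement[1]
--         ]
--         adjusted_positions.append(adjusted_pos)
--
--     return adjusted_positions
-- ===== SOURCE B (Python) =====
-- def adjust_positions_for_camera_movement(positions, camera_movements):
--     """Adjust object positions for camera movement: build the table of
--     cumulative offsets first, then emit via zip + a tail at the final offset."""
--     n = min(len(positions), len(camera_movements))
--     offsets = []
--     ox = oy = 0
--     for mx, my in camera_movements[:n]:
--         ox -= mx
--         oy -= my
--         offsets.append((ox, oy))
--     head = [[px + dx, py + dy] for (px, py), (dx, dy) in zip(positions, offsets)]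
--     tail = [[px + ox, py + oy] for (px, py) in positions[n:]]
--     return head + tail
-- ===== Notes on version B (the rewrite author's own statement) =====
-- stated objective: alternative
-- what changed: B separates accumulation from emission: it precomputes the table of cumulative camera offsets over camera_movements[:min(len(positions),len(camera_movements))], then builds the head by zipping positions with that table and the tail by mapping the final offset over the remaining positions, instead of A's single fused loop carrying mutable cumulative state and an index guard.
import Mathlib
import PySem

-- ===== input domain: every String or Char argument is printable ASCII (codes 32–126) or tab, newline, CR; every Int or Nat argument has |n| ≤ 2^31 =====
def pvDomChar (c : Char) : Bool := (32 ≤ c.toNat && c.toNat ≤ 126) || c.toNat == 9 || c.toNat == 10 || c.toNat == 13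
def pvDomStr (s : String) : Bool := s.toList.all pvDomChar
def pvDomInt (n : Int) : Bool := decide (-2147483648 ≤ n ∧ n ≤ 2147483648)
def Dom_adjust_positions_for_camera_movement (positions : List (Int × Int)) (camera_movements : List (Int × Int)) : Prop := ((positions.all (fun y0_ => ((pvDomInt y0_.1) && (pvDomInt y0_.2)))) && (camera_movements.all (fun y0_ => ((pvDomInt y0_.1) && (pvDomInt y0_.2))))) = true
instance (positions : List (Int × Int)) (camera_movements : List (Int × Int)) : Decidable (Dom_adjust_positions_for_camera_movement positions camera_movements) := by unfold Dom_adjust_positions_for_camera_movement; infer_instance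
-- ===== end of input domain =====

-- B precomputes the cumulative-offset table, then emits head (zip) and tail (final offset);
-- A fuses index-guarded accumulation and emission in one stateful loop. Same cost, different decomposition.

-- ===== PORT A =====
-- A's `for i, pos in enumerate(positions)` is a fold over positions carrying the
-- running index i in the state, together with acc and the cumulative movement.
-- pvStepA is the loop body, named so the proofs can speak about one iteration.
def pvStepA (camera_movements : List (Int × Int))
    (st : List (List Int) × Int × Int × Int) (pos : Int × Int) :
    List (List Int) × Int × Int × Int :=
  let i := st.2.1
  let c : Int × Int :=
    if i < PySem.List.len camera_movements then
      let m := PySem.List.pyGetD camera_movements i (0, 0)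
      (st.2.2.1 - m.1, st.2.2.2 - m.2)
    else (st.2.2.1, st.2.2.2)
  (st.1 ++ [[pos.1 + c.1, pos.2 + c.2]], i + 1, c)

def adjust_positions_for_camera_movement (positions : List (Int × Int)) (camera_movements : List (Int × Int)) : List (List Int) :=
  (positions.foldl (pvStepA camera_movements) ([], 0, 0, 0)).1

-- ===== PORT B =====
-- pvStepB is B's accumulation-loop body, named so the proofs can speak about one iteration.
def pvStepB (st : List (Int × Int) × Int × Int) (m : Int × Int) :
    List (Int × Int) × Int × Int :=
  let ox := st.2.1 - m.1
  let oy := st.2.2 - m.2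
  (st.1 ++ [(ox, oy)], ox, oy)

def adjust_positions_for_camera_movement_alt (positions : List (Int × Int)) (camera_movements : List (Int × Int)) : List (List Int) :=
  let n := min positions.length camera_movements.length
  let st := (camera_movements.take n).foldl pvStepB ([], 0, 0)
  let head := (positions.zip st.1).map (fun pd => [pd.1.1 + pd.2.1, pd.1.2 + pd.2.2])
  let tail := (positions.drop n).map (fun p => [p.1 + st.2.1, p.2 + st.2.2])
  head ++ tail

-- ===== PRECONDITION & SPEC =====
def Spec_adjust_positions_for_camera_movement (positions : List (Int × Int)) (camera_movements : List (Int × Int)) (out : List (List Int)) : Prop := out = adjust_positions_for_camera_movement_alt positions camera_movements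
instance (positions : List (Int × Int)) (camera_movements : List (Int × Int)) (out : List (List Int)) : Decidable (Spec_adjust_positions_for_camera_movement positions camera_movements out) := by unfold Spec_adjust_positions_for_camera_movement; infer_instance

-- ===== CLAIM (what is proved, stated in full; the proofs are below) =====
def Claim_equal_adjust_positions_for_camera_movement : Prop := ∀ (positions : List (Int × Int)) (camera_movements : List (Int × Int)), Dom_adjust_positions_for_camera_movement positions camera_movements → Spec_adjust_positions_for_camera_movement positions camera_movements (adjust_positions_for_camera_movement positions camera_movements)

-- ===== LEMMAS AND PROOFS =====

-- Reference recursion: consumes positions and movements in lockstep, carrying the cumulative offset.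
def pvGo : List (Int × Int) → List (Int × Int) → Int → Int → List (List Int)
  | [], _, _, _ => []
  | p :: ps, [], cx, cy => [p.1 + cx, p.2 + cy] :: pvGo ps [] cx cy
  | p :: ps, m :: ms, cx, cy =>
      [p.1 + (cx - m.1), p.2 + (cy - m.2)] :: pvGo ps ms (cx - m.1) (cy - m.2)

-- Cumulative-offset table of B, as a recursion.
def pvOffs : List (Int × Int) → Int → Int → List (Int × Int)
  | [], _, _ => []
  | m :: ms, cx, cy => (cx - m.1, cy - m.2) :: pvOffs ms (cx - m.1) (cy - m.2)

theorem pvA_loop (cms : List (Int × Int)) :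
    ∀ (ps : List (Int × Int)) (i : Nat) (acc : List (List Int)) (cx cy : Int),
    (ps.foldl (pvStepA cms) (acc, (i : Int), cx, cy)).1
    = acc ++ pvGo ps (cms.drop i) cx cy := by
  intro ps
  induction ps with
  | nil => intro i acc cx cy; simp [pvGo]
  | cons p ps ih =>
    intro i acc cx cy
    rw [List.foldl_cons]
    by_cases hi : i < cms.length
    · have hm : PySem.List.pyGetD cms ((i : Nat) : Int) (0, 0) = cms[i] := by
        rw [PySem.List.pyGetD_natCast]
        simp [List.getD_eq_getElem?_getD, List.getElem?_eq_getElem hi]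
      have hstep : pvStepA cms (acc, (i : Int), cx, cy) p
          = (acc ++ [[p.1 + (cx - cms[i].1), p.2 + (cy - cms[i].2)]],
             ((i + 1 : Nat) : Int), cx - cms[i].1, cy - cms[i].2) := by
        simp only [pvStepA, PySem.List.len_eq]
        rw [if_pos (by exact_mod_cast hi), hm]
        push_cast
        rfl
      rw [hstep, ih, List.drop_eq_getElem_cons hi]
      simp [pvGo]
    · have hstep : pvStepA cms (acc, (i : Int), cx, cy) p
          = (acc ++ [[p.1 + cx, p.2 + cy]], ((i + 1 : Nat) : Int), cx, cy) := by
        simp only [pvStepA, PySem.List.len_eq]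
        rw [if_neg (by exact_mod_cast hi)]
        push_cast
        rfl
      have h1 : cms.drop i = [] := List.drop_eq_nil_of_le (by omega)
      have h2 : cms.drop (i + 1) = [] := List.drop_eq_nil_of_le (by omega)
      rw [hstep, ih, h1, h2]
      simp [pvGo]

theorem pvB_fold :
    ∀ (ms : List (Int × Int)) (acc : List (Int × Int)) (cx cy : Int),
    (ms.foldl pvStepB (acc, cx, cy))
    = (acc ++ pvOffs ms cx cy, ((pvOffs ms cx cy).getLastD (cx, cy)).1,
       ((pvOffs ms cx cy).getLastD (cx, cy)).2) := by
  intro ms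
  induction ms with
  | nil => intro acc cx cy; simp [pvOffs]
  | cons m ms ih =>
    intro acc cx cy
    rw [List.foldl_cons]
    have hstep : pvStepB (acc, cx, cy) m
        = (acc ++ [(cx - m.1, cy - m.2)], cx - m.1, cy - m.2) := rfl
    rw [hstep, ih]
    simp only [pvOffs, List.getLastD_cons, List.append_assoc, List.singleton_append]

theorem pvGo_eq_split :
    ∀ (ps cms : List (Int × Int)) (cx cy : Int),
    pvGo ps cms cx cy =
      ((ps.zip (pvOffs (cms.take (min ps.length cms.length)) cx cy)).map
        (fun pd => [pd.1.1 + pd.2.1, pd.1.2 + pd.2.2]))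
      ++ ((ps.drop (min ps.length cms.length)).map
        (fun p => [p.1 + ((pvOffs (cms.take (min ps.length cms.length)) cx cy).getLastD (cx, cy)).1,
                   p.2 + ((pvOffs (cms.take (min ps.length cms.length)) cx cy).getLastD (cx, cy)).2])) := by
  intro ps
  induction ps with
  | nil => intro cms cx cy; simp [pvGo]
  | cons p ps ih =>
    intro cms cx cy
    cases cms with
    | nil => simp [pvGo, pvOffs, ih [], List.map_cons]
    | cons m ms =>
      have hmin : min (p :: ps).length (m :: ms).length = min ps.length ms.length + 1 := by
        simp [Nat.succ_min_succ]
      rw [hmin]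
      simp only [pvGo, List.take_succ_cons, pvOffs, List.zip_cons_cons, List.map_cons,
        List.drop_succ_cons, List.getLastD_cons]
      rw [ih ms (cx - m.1) (cy - m.2)]
      simp

-- ===== VERDICT (by name: the statement is the Claim_ definition above) =====
theorem adjust_positions_for_camera_movement_spec : Claim_equal_adjust_positions_for_camera_movement := by
  intro positions camera_movements _
  unfold Spec_adjust_positions_for_camera_movement
  unfold adjust_positions_for_camera_movement adjust_positions_for_camera_movement_alt
  have hA := pvA_loop camera_movements positions 0 [] 0 0
  simp only [Nat.cast_zero] at hA
  rw [hA]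
  simp only [List.drop_zero, List.nil_append]
  rw [pvB_fold]
  exact pvGo_eq_split positions camera_movements 0 0
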